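-- pv_equiv track=rewrite | github.com/daviburg/narrative-state-engine | tools/extract_structured_data.py | _normalize_timeline_season
-- ===== SOURCE A (Python) =====
-- _SEASON_PREFIX_MAP = {
--     "spring": "mid_spring",
--     "summer": "mid_summer",
--     "fall": "mid_autumn",
--     "autumn": "mid_autumn",
--     "winter": "mid_winter",
-- }
--
-- def _normalize_timeline_season(name: str) -> str:
--     """Normalize season name to a timeline-schema-compliant enum value.
--
--     Unprefixed names get a ``mid_`` prefix; already-prefixed names are
--     passed through (with ``fall`` → ``autumn`` correction).
--     """
--     name = name.strip().lower()
--     for prefix in ("early_", "mid_", "late_"):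
--         if name.startswith(prefix):
--             base = name[len(prefix):]
--             if base == "fall":
--                 return f"{prefix}autumn"
--             return name
--     return _SEASON_PREFIX_MAP.get(name, name)
-- ===== SOURCE B (Python) =====
-- _SEASON_NORMALIZATION_TABLE = {
--     "spring": "mid_spring",
--     "summer": "mid_summer",
--     "fall": "mid_autumn",
--     "autumn": "mid_autumn",
--     "winter": "mid_winter",
--     "early_fall": "early_autumn",
--     "mid_fall": "mid_autumn",
--     "late_fall": "late_autumn",
-- }
--
--
-- def _normalize_timeline_season(name: str) -> str:
--     """Normalize season name to a timeline-schema-compliant enum value.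
--
--     Every name needing correction is one of finitely many strings, so a
--     single precomputed table lookup replaces all prefix logic; any name
--     not in the table is already schema-compliant (or unknown) and passes
--     through unchanged.
--     """
--     name = name.strip().lower()
--     return _SEASON_NORMALIZATION_TABLE.get(name, name)
-- ===== Notes on version B (the rewrite author's own statement) =====
-- stated objective: simpler
-- what changed: B removes all prefix-scanning and slicing logic: it precomputes one flat 8-entry table (the five bare seasons plus the three prefixed fall->autumn corrections) and does a single dict lookup with identity fallback.
import Mathlib
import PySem

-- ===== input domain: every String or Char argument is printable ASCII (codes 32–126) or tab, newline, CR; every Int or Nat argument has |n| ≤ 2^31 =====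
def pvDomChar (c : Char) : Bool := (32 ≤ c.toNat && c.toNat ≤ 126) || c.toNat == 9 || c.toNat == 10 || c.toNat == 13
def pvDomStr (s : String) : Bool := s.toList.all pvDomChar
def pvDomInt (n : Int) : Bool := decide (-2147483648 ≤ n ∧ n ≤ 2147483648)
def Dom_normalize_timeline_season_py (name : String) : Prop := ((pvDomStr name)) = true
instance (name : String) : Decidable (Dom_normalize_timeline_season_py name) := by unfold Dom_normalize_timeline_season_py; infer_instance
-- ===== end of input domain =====

-- B replaces A's prefix scan + slice-and-rewrite logic by one precomputed 8-entry
-- normalization table and a single dict lookup with identity fallback (objective: simpler).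


-- ===== PORT A =====
-- module-level _SEASON_PREFIX_MAP of A
def pvSeasonMap : PySem.Dict String String :=
  (((((PySem.Dict.empty).insert "spring" "mid_spring").insert "summer" "mid_summer").insert
      "fall" "mid_autumn").insert "autumn" "mid_autumn").insert "winter" "mid_winter"

-- the body of A after `name = name.strip().lower()`; the for-loop with early return is the
-- Option-valued fold over the literal prefix tuple
def pvACore (n : String) : String :=
  match ["early_", "mid_", "late_"].foldl
      (fun acc pre =>
        match acc with
        | some r => some r
        | none =>
          if PySem.Str.startswith n pre then
            let base := PySem.Str.slice n (some (PySem.Str.len pre)) none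
            some (if base == "fall" then pre ++ "autumn" else n)
          else none) none with
  | some r => r
  | none => pvSeasonMap.getD n n

def normalize_timeline_season_py (name : String) : String :=
  pvACore (PySem.Str.lower (PySem.Str.strip name))

-- ===== PORT B =====
-- B's module-level _SEASON_NORMALIZATION_TABLE (8 entries)
def pvSeasonTable : PySem.Dict String String :=
  ((((((((PySem.Dict.empty).insert "spring" "mid_spring").insert "summer" "mid_summer").insert
      "fall" "mid_autumn").insert "autumn" "mid_autumn").insert "winter" "mid_winter").insert
      "early_fall" "early_autumn").insert "mid_fall" "mid_autumn").insert "late_fall" "late_autumn"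

def normalize_timeline_season_py_alt (name : String) : String :=
  let n := PySem.Str.lower (PySem.Str.strip name)
  pvSeasonTable.getD n n

-- ===== PRECONDITION & SPEC =====
def Spec_normalize_timeline_season_py (name : String) (out : String) : Prop := out = normalize_timeline_season_py_alt name
instance (name : String) (out : String) : Decidable (Spec_normalize_timeline_season_py name out) := by unfold Spec_normalize_timeline_season_py; infer_instance

-- ===== CLAIM (what is proved, stated in full; the proofs are below) =====
def Claim_equal_normalize_timeline_season_py : Prop := ∀ (name : String), Dom_normalize_timeline_season_py name → Spec_normalize_timeline_season_py name (normalize_timeline_season_py name)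

-- ===== LEMMAS AND PROOFS =====

-- if n starts with pre and the rest of n is exactly "fall", n is pre ++ "fall"
lemma pv_eq_of_sw_fall (n pre : String)
    (hsw : PySem.Str.startswith n pre = true)
    (hb : PySem.Str.slice n (some (PySem.Str.len pre)) none = "fall") :
    n = pre ++ "fall" := by
  have hp : pre.toList <+: n.toList := by
    rw [PySem.Str.startswith_eq] at hsw
    exact (PySem.Chars.startswith_iff _ _).mp hsw
  obtain ⟨t, ht⟩ := hp
  have hlen : PySem.Str.len pre = (pre.toList.length : Int) := by
    simp [PySem.Str.len_eq]
  have hd : n.toList.drop pre.toList.length = ("fall" : String).toList := by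
    have := congrArg String.toList hb
    rwa [PySem.Str.toList_slice, PySem.Chars.slice_eq_listSlice, hlen,
      PySem.List.slice_from n.toList (Int.natCast_nonneg _), Int.toNat_natCast] at this
  have hnl : n.toList = pre.toList ++ ("fall" : String).toList := by
    rw [← ht] at hd ⊢
    rw [List.drop_left] at hd
    rw [hd]
  have : n.toList = (pre ++ "fall").toList := by
    rw [hnl]; simp
  exact String.toList_inj.mp this

-- table lookup is the identity off the eight keys
lemma pv_table_id (n : String)
    (h1 : n ≠ "spring") (h2 : n ≠ "summer") (h3 : n ≠ "fall") (h4 : n ≠ "autumn")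
    (h5 : n ≠ "winter") (h6 : n ≠ "early_fall") (h7 : n ≠ "mid_fall") (h8 : n ≠ "late_fall") :
    pvSeasonTable.getD n n = n := by
  simp [pvSeasonTable, PySem.Dict.getD_insert, h1, h2, h3, h4, h5, h6, h7, h8]

-- A's fallback map is the identity off its five keys
lemma pv_map_id (n : String)
    (h1 : n ≠ "spring") (h2 : n ≠ "summer") (h3 : n ≠ "fall") (h4 : n ≠ "autumn")
    (h5 : n ≠ "winter") :
    pvSeasonMap.getD n n = n := by
  simp [pvSeasonMap, PySem.Dict.getD_insert, h1, h2, h3, h4, h5]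

-- the two cores agree on every string
lemma pv_core_eq (n : String) : pvACore n = pvSeasonTable.getD n n := by
  by_cases k1 : n = "spring"
  · subst k1; decide
  by_cases k2 : n = "summer"
  · subst k2; decide
  by_cases k3 : n = "fall"
  · subst k3; decide
  by_cases k4 : n = "autumn"
  · subst k4; decide
  by_cases k5 : n = "winter"
  · subst k5; decide
  by_cases k6 : n = "early_fall"
  · subst k6; decide
  by_cases k7 : n = "mid_fall"
  · subst k7; decide
  by_cases k8 : n = "late_fall"
  · subst k8; decide
  -- n is none of the eight keys: both sides return n
  rw [pv_table_id n k1 k2 k3 k4 k5 k6 k7 k8]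
  have hbase : ∀ pre : String, PySem.Str.startswith n pre = true → n ≠ pre ++ "fall" →
      (PySem.Str.slice n (some (PySem.Str.len pre)) none == "fall") = false := by
    intro pre hsw hne
    exact beq_eq_false_iff_ne.mpr (fun hc => hne (pv_eq_of_sw_fall n pre hsw hc))
  by_cases s1 : PySem.Str.startswith n "early_" = true
  · have hb := hbase "early_" s1 (by intro hc; exact k6 (by rw [hc]; decide))
    simp only [pvACore, List.foldl_cons, List.foldl_nil, s1, if_true, hb,
      Bool.false_eq_true, if_false]
  · have s1' : PySem.Str.startswith n "early_" = false := Bool.eq_false_iff.mpr s1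
    by_cases s2 : PySem.Str.startswith n "mid_" = true
    · have hb := hbase "mid_" s2 (by intro hc; exact k7 (by rw [hc]; decide))
      simp only [pvACore, List.foldl_cons, List.foldl_nil, s1', s2, if_true, hb,
        Bool.false_eq_true, if_false]
    · have s2' : PySem.Str.startswith n "mid_" = false := Bool.eq_false_iff.mpr s2
      by_cases s3 : PySem.Str.startswith n "late_" = true
      · have hb := hbase "late_" s3 (by intro hc; exact k8 (by rw [hc]; decide))
        simp only [pvACore, List.foldl_cons, List.foldl_nil, s1', s2', s3, if_true, hb,
          Bool.false_eq_true, if_false]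
      · have s3' : PySem.Str.startswith n "late_" = false := Bool.eq_false_iff.mpr s3
        simp only [pvACore, List.foldl_cons, List.foldl_nil, s1', s2', s3',
          Bool.false_eq_true, if_false]
        exact pv_map_id n k1 k2 k3 k4 k5

-- ===== VERDICT (by name: the statement is the Claim_ definition above) =====
theorem normalize_timeline_season_py_spec : Claim_equal_normalize_timeline_season_py := by
  intro name _
  unfold Spec_normalize_timeline_season_py normalize_timeline_season_py normalize_timeline_season_py_alt
  exact pv_core_eq _
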